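-- pv_equiv track=rewrite | github.com/ja-rg/Criptographics | Cifrados/Hill.py | vector_a_matriz
-- ===== SOURCE A (Python) =====
-- from typing import List, Tuple
--
-- def vector_a_matriz(vec: List[int], n: int) -> List[List[int]]:
--     # Rellena con 0 (padding) hasta múltiplo de n y forma matriz n×c por columnas
--     v = vec[:]
--     resto = len(v) % n
--     if resto:
--         v.extend([0]*(n - resto))  # padding con 0 ('A')
--     c = len(v)//n
--     M = [[0]*c for _ in range(n)]
--     idx = 0
--     for j in range(c):
--         for i in range(n):
--             M[i][j] = v[idx]
--             idx += 1
--     return M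
-- ===== SOURCE B (Python) =====
-- def vector_a_matriz(vec, n):
--     # One pass: deal each element into the bucket of its index's residue class
--     # mod n, then emit row i as bucket i padded with zeros up to c columns.
--     q, r = divmod(len(vec), n)
--     c = q + (1 if r else 0)
--     buckets = {}
--     for k, x in enumerate(vec):
--         buckets.setdefault(k % n, []).append(x)
--     return [buckets.get(i, []) + [0] * (c - len(buckets.get(i, []))) for i in range(n)]
-- ===== Notes on version B (the rewrite author's own statement) =====
-- stated objective: alternative
-- what changed: Replaces A's preallocated n-by-c zero matrix filled by an index-walking nested loop over a padded copy with a single pass over the original vector that deals each element into a dict bucket keyed by its index's residue mod n, emitting row i as bucket i padded with zeros.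
import Mathlib
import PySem

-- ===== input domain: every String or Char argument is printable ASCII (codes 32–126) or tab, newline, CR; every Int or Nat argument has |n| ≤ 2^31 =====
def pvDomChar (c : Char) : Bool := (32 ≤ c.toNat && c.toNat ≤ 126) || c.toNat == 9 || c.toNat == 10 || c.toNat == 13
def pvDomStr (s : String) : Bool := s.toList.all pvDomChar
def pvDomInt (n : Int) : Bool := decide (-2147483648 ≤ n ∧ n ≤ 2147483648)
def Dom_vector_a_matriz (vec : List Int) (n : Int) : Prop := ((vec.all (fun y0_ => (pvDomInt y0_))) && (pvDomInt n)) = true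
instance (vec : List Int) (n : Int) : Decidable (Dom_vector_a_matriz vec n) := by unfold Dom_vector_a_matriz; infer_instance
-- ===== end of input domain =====

-- B makes one pass over the original vector, dealing each element into a dict bucket
-- keyed by its index's residue mod n, and emits row i as bucket i padded with zeros —
-- no padded copy, no preallocated matrix, no nested index loop. Same cost as A.

-- ===== PORT A =====
def pvPad (vec : List Int) (n : Int) : List Int :=
  let resto := PySem.Int.mod (vec.length : Int) n
  if resto ≠ 0 then vec ++ List.replicate (n - resto).toNat 0 else vec

def vector_a_matriz (vec : List Int) (n : Int) : List (List Int) :=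
  let v := pvPad vec n
  let c := PySem.Int.floordiv (v.length : Int) n
  let M := (PySem.List.pyRange 0 n 1).map (fun _ => List.replicate c.toNat (0 : Int))
  ((PySem.List.pyRange 0 c 1).foldl (fun st j =>
      (PySem.List.pyRange 0 n 1).foldl (fun (st : List (List Int) × Int) i =>
        (PySem.List.pySetD st.1 i
          (PySem.List.pySetD (PySem.List.pyGetD st.1 i []) j (PySem.List.pyGetD v st.2 0)),
         st.2 + 1)) st)
    (M, (0 : Int))).1

-- ===== PORT B =====
def vector_a_matriz_alt (vec : List Int) (n : Int) : List (List Int) :=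
  let q := PySem.Int.floordiv (vec.length : Int) n
  let r := PySem.Int.mod (vec.length : Int) n
  let c := q + (if r ≠ 0 then 1 else 0)
  let buckets := (PySem.List.enumerate vec 0).foldl
    (fun (d : PySem.Dict Int (List Int)) p =>
      d.modify (PySem.Int.mod p.1 n) [] (· ++ [p.2])) PySem.Dict.empty
  (PySem.List.pyRange 0 n 1).map (fun i =>
    buckets.getD i [] ++ List.replicate (c - ((buckets.getD i []).length : Int)).toNat 0)

-- ===== PRECONDITION & SPEC =====
-- Pre_ excludes exactly n = 0, where the Python A raises ZeroDivisionError on len(v) % n.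
def Pre_vector_a_matriz (_vec : List Int) (n : Int) : Prop := n ≠ 0
instance (vec : List Int) (n : Int) : Decidable (Pre_vector_a_matriz vec n) := by
  unfold Pre_vector_a_matriz; infer_instance
def pvWitness_vector_a_matriz : List Int × Int := ([1, 2, 3], 2)

def Spec_vector_a_matriz (vec : List Int) (n : Int) (out : List (List Int)) : Prop := out = vector_a_matriz_alt vec n
instance (vec : List Int) (n : Int) (out : List (List Int)) : Decidable (Spec_vector_a_matriz vec n out) := by unfold Spec_vector_a_matriz; infer_instance

-- ===== CLAIM (what is proved, stated in full; the proofs are below) =====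
def Claim_equal_vector_a_matriz : Prop := ∀ (vec : List Int) (n : Int), Dom_vector_a_matriz vec n → Pre_vector_a_matriz vec n → Spec_vector_a_matriz vec n (vector_a_matriz vec n)

-- ===== LEMMAS AND PROOFS =====

-- ---------- A side: the nested index loop fills the column-major matrix ----------
def pvInner (v : List Int) (j : Nat) : Nat → List (List Int) → Int → List (List Int)
  | 0, M, _ => M
  | m + 1, M, k =>
      (pvInner v j m M k).set m
        (((pvInner v j m M k).getD m []).set j (PySem.List.pyGetD v (k + m) 0))

lemma pvInner_eq (v : List Int) (j : Nat) (m : Nat) (M : List (List Int)) (k : Int) :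
    (List.range m).foldl
      (fun (st : List (List Int) × Int) (i : Nat) =>
        (st.1.set i ((st.1.getD i []).set j (PySem.List.pyGetD v st.2 0)), st.2 + 1))
      (M, k)
    = (pvInner v j m M k, k + m) := by
  induction m with
  | zero => simp [pvInner]
  | succ m ih =>
      rw [List.range_succ, List.foldl_append, ih]
      simp only [List.foldl_cons, List.foldl_nil, pvInner]
      congr 1
      push_cast; ring

lemma pvInner_length (v : List Int) (j : Nat) (m : Nat) (M : List (List Int)) (k : Int) :
    (pvInner v j m M k).length = M.length := by
  induction m with
  | zero => rfl
  | succ m ih => simp [pvInner, ih]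

lemma pvInner_getD (v : List Int) (j : Nat) (m : Nat) (M : List (List Int)) (k : Int) (i : Nat) :
    (pvInner v j m M k).getD i []
    = if i < m then (M.getD i []).set j (PySem.List.pyGetD v (k + i) 0)
      else M.getD i [] := by
  induction m with
  | zero => simp [pvInner]
  | succ m ih =>
      simp only [pvInner]
      rcases eq_or_ne i m with rfl | hne
      · by_cases hlen : i < M.length
        · rw [List.getD_eq_getElem?_getD, List.getElem?_set_self
            (by rw [pvInner_length]; exact hlen)]
          simp only [Option.getD_some]
          rw [ih, if_neg (Nat.lt_irrefl i), if_pos (Nat.lt_succ_self i)]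
        · rw [List.getD_eq_default _ _ (by simp only [List.length_set, pvInner_length]; omega),
            if_pos (Nat.lt_succ_self i),
            List.getD_eq_default _ _ (by omega)]
          simp
      · rw [List.getD_eq_getElem?_getD, List.getElem?_set_ne (by omega),
          ← List.getD_eq_getElem?_getD, ih]
        rcases Nat.lt_or_ge i m with h | h
        · rw [if_pos h, if_pos (by omega)]
        · rw [if_neg (by omega), if_neg (by omega)]

def pvOuterF (v : List Int) (N t : Nat) (M : List (List Int)) : List (List Int) × Int :=
  (List.range t).foldl (fun st jn => (pvInner v jn N st.1 st.2, st.2 + (N : Int))) (M, 0)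

lemma pvOuterF_succ (v : List Int) (N t : Nat) (M : List (List Int)) :
    pvOuterF v N (t + 1) M
    = (pvInner v t N (pvOuterF v N t M).1 (pvOuterF v N t M).2, (pvOuterF v N t M).2 + N) := by
  unfold pvOuterF
  rw [List.range_succ, List.foldl_append]
  simp

lemma pvOuterF_snd (v : List Int) (N t : Nat) (M : List (List Int)) :
    (pvOuterF v N t M).2 = ((t * N : Nat) : Int) := by
  induction t with
  | zero => simp [pvOuterF]
  | succ t ih => rw [pvOuterF_succ, ih]; push_cast; ring

lemma pvOuterF_length (v : List Int) (N t : Nat) (M : List (List Int)) :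
    (pvOuterF v N t M).1.length = M.length := by
  induction t with
  | zero => simp [pvOuterF]
  | succ t ih => rw [pvOuterF_succ]; simp [pvInner_length, ih]

lemma pvOuterF_rowlen (v : List Int) (N t : Nat) (M : List (List Int)) (i : Nat) :
    ((pvOuterF v N t M).1.getD i []).length = (M.getD i []).length := by
  induction t with
  | zero => simp [pvOuterF]
  | succ t ih =>
      rw [pvOuterF_succ]
      simp only [pvInner_getD]
      by_cases h : i < N
      · rw [if_pos h, List.length_set, ih]
      · rw [if_neg h, ih]

lemma pvOuterF_getD (v : List Int) (N t : Nat) (M : List (List Int)) (i jj : Nat) :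
    ((pvOuterF v N t M).1.getD i []).getD jj 0
    = if i < N ∧ jj < t ∧ jj < (M.getD i []).length then v.getD (jj * N + i) 0
      else (M.getD i []).getD jj 0 := by
  induction t with
  | zero => simp [pvOuterF]
  | succ t ih =>
      rw [pvOuterF_succ]
      simp only [pvInner_getD]
      by_cases h : i < N
      · rw [if_pos h, pvOuterF_snd]
        have hget : PySem.List.pyGetD v (((t * N : Nat) : Int) + (i : Nat)) 0
            = v.getD (t * N + i) 0 := by
          rw [show (((t * N : Nat) : Int) + (i : Nat)) = ((t * N + i : Nat) : Int) by push_cast; ring,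
            PySem.List.pyGetD_natCast]
        rw [hget]
        rcases eq_or_ne jj t with rfl | hne
        · by_cases hlen : jj < ((pvOuterF v N jj M).1.getD i []).length
          · rw [List.getD_eq_getElem?_getD, List.getElem?_set, if_pos rfl, if_pos hlen]
            rw [pvOuterF_rowlen] at hlen
            simp only [Option.getD_some]
            rw [if_pos ⟨h, Nat.lt_succ_self jj, hlen⟩]
          · rw [List.getD_eq_getElem?_getD, List.getElem?_set, if_pos rfl, if_neg hlen]
            rw [pvOuterF_rowlen] at hlen
            rw [if_neg (by omega)]
            simp only [Option.getD_none]
            rw [List.getD_eq_default _ _ (by omega)]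
        · rw [List.getD_eq_getElem?_getD, List.getElem?_set, if_neg (by omega),
            ← List.getD_eq_getElem?_getD, ih]
          by_cases hjt : jj < t ∧ jj < (M.getD i []).length
          · rw [if_pos ⟨h, hjt.1, hjt.2⟩, if_pos ⟨h, by omega, hjt.2⟩]
          · rw [if_neg (by tauto), if_neg (by omega)]
      · rw [if_neg h, ih, if_neg (by tauto), if_neg (by tauto)]

-- the common column-major target: row i, column j holds v[j*N+i]
def pvTgt (v : List Int) (N C : Nat) : List (List Int) :=
  (List.range N).map (fun i => (List.range C).map (fun j => v.getD (j * N + i) 0))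

lemma pvA_rows (v : List Int) (N C : Nat) :
    (pvOuterF v N C ((List.range N).map (fun _ => List.replicate C (0 : Int)))).1
    = pvTgt v N C := by
  set M := (List.range N).map (fun _ => List.replicate C (0 : Int)) with hM
  have hMget : ∀ i : Nat, i < N → M.getD i [] = List.replicate C (0 : Int) := by
    intro i hi
    rw [List.getD_eq_getElem?_getD, hM, List.getElem?_map,
      List.getElem?_range hi]
    rfl
  apply List.ext_getElem
  · rw [pvOuterF_length]; simp [hM, pvTgt]
  · intro i h1 h2
    have hi : i < N := by simpa [pvTgt] using h2
    rw [← List.getD_eq_getElem (pvOuterF v N C M).1 [] h1]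
    have htgt : (pvTgt v N C)[i] = (List.range C).map (fun j => v.getD (j * N + i) 0) := by
      simp [pvTgt]
    rw [htgt]
    apply List.ext_getElem
    · rw [pvOuterF_rowlen, hMget i hi]; simp
    · intro jj g1 g2
      have hjj : jj < C := by simpa using g2
      rw [← List.getD_eq_getElem _ (0 : Int) g1, pvOuterF_getD, hMget i hi]
      rw [if_pos ⟨hi, hjj, by simpa using hjj⟩]
      simp

-- ---------- B side: the residue-class buckets are the rows ----------

-- which indices below r (r ≤ N) have residue i mod N
lemma pvFiltBase (N i : Nat) (r : Nat) (hr : r ≤ N) :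
    (List.range r).filter (fun k => k % N == i) = if i < r then [i] else [] := by
  induction r with
  | zero => simp
  | succ r ih =>
      have hr' : r ≤ N := by omega
      rw [List.range_succ, List.filter_append, ih hr']
      have hrN : r % N = r := Nat.mod_eq_of_lt (by omega)
      rcases Nat.lt_trichotomy i r with h | h | h
      · rw [if_pos h, if_pos (by omega)]
        have : ¬ r = i := by omega
        simp [hrN, this]
      · subst h
        rw [if_neg (by omega), if_pos (by omega)]
        simp [hrN]
      · rw [if_neg (by omega), if_neg (by omega)]
        have : ¬ r = i := by omega
        simp [hrN, this]

-- indices below q*N + r with residue i are exactly i, N+i, …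
lemma pvFilt (N i : Nat) (hi : i < N) :
    ∀ (q r : Nat), r ≤ N →
    (List.range (q * N + r)).filter (fun k => k % N == i)
    = (List.range (q + (if i < r then 1 else 0))).map (fun j => j * N + i) := by
  intro q
  induction q with
  | zero =>
      intro r hr
      rw [Nat.zero_mul, Nat.zero_add, pvFiltBase N i r hr]
      by_cases h : i < r
      · rw [if_pos h, if_pos h]; simp
      · rw [if_neg h, if_neg h]; simp
  | succ q ih =>
      intro r hr
      have hsplit : (q + 1) * N + r = N + (q * N + r) := by ring
      rw [hsplit, List.range_add, List.filter_append, pvFiltBase N i N le_rfl, if_pos hi]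
      have hmap : (List.filter (fun k => k % N == i) ((List.range (q * N + r)).map (fun k => N + k)))
          = ((List.range (q * N + r)).filter (fun k => k % N == i)).map (fun k => N + k) := by
        rw [List.filter_map]
        congr 1
        apply List.filter_congr
        intro k _
        simp [Function.comp, Nat.add_mod_left]
      rw [hmap, ih r hr,
        show q + 1 + (if i < r then 1 else 0) = (q + (if i < r then 1 else 0)) + 1 by omega,
        List.range_succ_eq_map, List.map_map, List.map_cons, List.map_map,
        List.singleton_append]
      exact congrArg₂ List.cons (by simp) (List.map_congr_left fun a _ => by
        simp only [Function.comp_def, Nat.succ_eq_add_one]; ring)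

-- getD through the zero padding
lemma pvGetD_pad (vec : List Int) (P m : Nat) :
    (vec ++ List.replicate P (0 : Int)).getD m 0
    = if m < vec.length then vec.getD m 0 else 0 := by
  by_cases h : m < vec.length
  · rw [if_pos h, List.getD_append _ _ _ _ h]
  · rw [if_neg h, List.getD_eq_getElem?_getD, List.getElem?_append_right (by omega)]
    rcases Nat.lt_or_ge (m - vec.length) P with hp | hp
    · simp [List.getElem?_replicate, hp]
    · rw [List.getElem?_eq_none (by simpa using hp)]
      rfl

-- the bucket fold, characterised: bucket i collects the elements whose index ≡ i (mod n)
lemma pvBucket (vec : List Int) (n : Int) (i : Int) :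
    ((PySem.List.enumerate vec 0).foldl
      (fun (d : PySem.Dict Int (List Int)) p =>
        d.modify (PySem.Int.mod p.1 n) [] (· ++ [p.2])) PySem.Dict.empty).getD i []
    = (((PySem.List.enumerate vec 0).filter
        (fun p => PySem.Int.mod p.1 n == i)).map (·.2)) := by
  have h1 : ((PySem.List.enumerate vec 0).foldl
      (fun (d : PySem.Dict Int (List Int)) p =>
        d.modify (PySem.Int.mod p.1 n) [] (· ++ [p.2])) PySem.Dict.empty)
      = (((PySem.List.enumerate vec 0).map (fun p => (PySem.Int.mod p.1 n, p.2))).foldl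
          (fun (d : PySem.Dict Int (List Int)) p => d.modify p.1 [] (· ++ [p.2]))
          PySem.Dict.empty) := by
    rw [List.foldl_map]
  rw [h1, PySem.Dict.getD_foldl_modify_append, PySem.Dict.getD_empty, List.nil_append,
    List.filter_map, List.map_map]
  rfl

-- ===== VERDICT helper: the main equality =====
lemma pv_main (vec : List Int) (n : Int) (hn : n ≠ 0) :
    vector_a_matriz vec n = vector_a_matriz_alt vec n := by
  rcases lt_or_gt_of_ne hn with hneg | hpos
  · -- n < 0 : both are []
    unfold vector_a_matriz vector_a_matriz_alt
    dsimp only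
    have hcle : PySem.Int.floordiv ((pvPad vec n).length : Int) n ≤ 0 := by
      have hq := PySem.Int.floordiv_mul_add_mod ((pvPad vec n).length : Int) n
      have hb := PySem.Int.mod_neg_bounds (a := ((pvPad vec n).length : Int)) hneg
      have hL : (0 : Int) ≤ ((pvPad vec n).length : Int) := Int.natCast_nonneg _
      nlinarith [hq, hb.1, hb.2, hL]
    rw [PySem.List.pyRange_one_eq_nil (le_of_lt hneg),
      PySem.List.pyRange_one_eq_nil hcle]
    simp
  · -- n > 0
    obtain ⟨N, rfl⟩ : ∃ N : Nat, n = (N : Int) := ⟨n.toNat, (Int.toNat_of_nonneg (le_of_lt hpos)).symm⟩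
    have hN : 0 < N := by exact_mod_cast hpos
    unfold vector_a_matriz vector_a_matriz_alt
    dsimp only
    set L := vec.length with hL
    set q := L / N with hq
    set r := L % N with hr
    have hLd : L = q * N + r := by rw [hq, hr, Nat.mul_comm]; exact (Nat.div_add_mod L N).symm
    have hrlt : r < N := Nat.mod_lt _ hN
    set v := pvPad vec (N : Int) with hv
    set Cnat := q + (if r ≠ 0 then 1 else 0) with hC
    -- the padded vector is vec ++ zeros, of length Cnat * N
    have hveq : v = vec ++ List.replicate (if r ≠ 0 then N - r else 0) 0 := by
      rw [hv]
      unfold pvPad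
      dsimp only
      rw [← hL, PySem.Int.mod_natCast, hr.symm.symm]
      by_cases h : r = 0
      · have h0 : L % N = 0 := by omega
        have hdvd : ((N : Nat) : Int) ∣ ((L : Nat) : Int) :=
          Int.natCast_dvd_natCast.mpr (Nat.dvd_of_mod_eq_zero h0)
        simp [h0, hdvd]
      · rw [if_pos (by exact_mod_cast h), if_pos h]
        congr 1
        rw [show ((N : Int) - (r : Nat)) = ((N - r : Nat) : Int) by
          push_cast [Nat.cast_sub (le_of_lt hrlt)]; ring]
        rw [Int.toNat_natCast]
    have hvlen : v.length = Cnat * N := by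
      rw [hveq, List.length_append, List.length_replicate, ← hL, hC]
      by_cases h : r = 0
      · simp [h]; omega
      · rw [if_pos h, if_pos h]
        have : (q + 1) * N = q * N + N := by ring
        omega
    have hCdiv : v.length / N = Cnat := by
      rw [hvlen, Nat.mul_div_cancel _ hN]
    have hCfd : PySem.Int.floordiv ((v.length : Nat) : Int) ((N : Nat) : Int) = ((Cnat : Nat) : Int) := by
      rw [PySem.Int.floordiv_natCast, hCdiv]
    rw [hCfd]
    -- B's column count equals Cnat
    have hcB : PySem.Int.floordiv ((L : Nat) : Int) ((N : Nat) : Int)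
        + (if PySem.Int.mod ((L : Nat) : Int) ((N : Nat) : Int) ≠ 0 then (1 : Int) else 0)
        = ((Cnat : Nat) : Int) := by
      rw [PySem.Int.floordiv_natCast, PySem.Int.mod_natCast, ← hq, ← hr, hC]
      by_cases h : r = 0
      · simp [h]
      · rw [if_pos (by exact_mod_cast h), if_pos h]
        push_cast; ring
    rw [hcB]
    simp only [PySem.List.pyRange_zero_natCast, Int.toNat_natCast, List.foldl_map,
      List.map_map, Function.comp_def]
    -- A side: rewrite the nested fold to pvOuterF, then to pvTgt
    have hstep :
        (fun (st : List (List Int) × Int) (jn : Nat) =>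
          (List.range N).foldl (fun (st : List (List Int) × Int) (i : Nat) =>
            (PySem.List.pySetD st.1 (i : Int)
              (PySem.List.pySetD (PySem.List.pyGetD st.1 (i : Int) []) ((jn : Nat) : Int)
                (PySem.List.pyGetD v st.2 0)),
             st.2 + 1)) st)
        = (fun (st : List (List Int) × Int) (jn : Nat) =>
            (pvInner v jn N st.1 st.2, st.2 + (N : Int))) := by
      funext st jn
      simp only [PySem.List.pySetD_natCast, PySem.List.pyGetD_natCast]
      exact pvInner_eq v jn N st.1 st.2
    rw [hstep]
    rw [show (List.foldl
        (fun (st : List (List Int) × Int) (jn : Nat) => (pvInner v jn N st.1 st.2, st.2 + (N : Int)))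
        ((List.range N).map (fun _ => List.replicate Cnat (0 : Int)), 0) (List.range Cnat)).1
        = pvTgt v N Cnat from pvA_rows v N Cnat]
    -- B side: each row is its residue bucket plus the zero padding
    unfold pvTgt
    apply List.map_congr_left
    intro iN hiN
    have hiNlt : iN < N := List.mem_range.mp hiN
    set K := q + (if iN < r then 1 else 0) with hK
    have hKC : K ≤ Cnat := by
      rw [hK, hC]
      by_cases h : iN < r
      · rw [if_pos h, if_pos (by omega)]
      · rw [if_neg h]
        by_cases h2 : r = 0 <;> simp [h2]
    have hidx_lt : ∀ j, j < K → j * N + iN < L := by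
      intro j hj
      rcases Nat.lt_or_ge iN r with hir | hir
      · rw [hK, if_pos hir] at hj
        have : j * N ≤ q * N := Nat.mul_le_mul_right N (by omega)
        omega
      · rw [hK, if_neg (by omega)] at hj
        have : (j + 1) * N ≤ q * N := Nat.mul_le_mul_right N (by omega)
        have h2 : (j + 1) * N = j * N + N := by ring
        omega
    have hidx_ge : ∀ j, K ≤ j → L ≤ j * N + iN := by
      intro j hj
      rcases Nat.lt_or_ge iN r with hir | hir
      · rw [hK, if_pos hir] at hj
        have : (q + 1) * N ≤ j * N := Nat.mul_le_mul_right N hj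
        have h2 : (q + 1) * N = q * N + N := by ring
        omega
      · rw [hK, if_neg (by omega)] at hj
        have : q * N ≤ j * N := Nat.mul_le_mul_right N hj
        omega
    -- the bucket for residue iN
    have hbucket :
        ((PySem.List.enumerate vec 0).foldl
          (fun (d : PySem.Dict Int (List Int)) p =>
            d.modify (PySem.Int.mod p.1 ((N : Nat) : Int)) [] (· ++ [p.2]))
          PySem.Dict.empty).getD ((iN : Nat) : Int) []
        = (List.range K).map (fun j => vec.getD (j * N + iN) 0) := by
      rw [pvBucket, PySem.List.enumerate_eq_map_pyRange (d := 0)]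
      simp only [PySem.List.len_eq, ← hL, PySem.List.pyRange_zero_natCast, List.map_map,
        Function.comp_def, List.filter_map]
      have hpred : ∀ k : Nat,
          ((PySem.Int.mod ((k : Nat) : Int) ((N : Nat) : Int) == ((iN : Nat) : Int)) : Bool)
          = ((k % N == iN) : Bool) := by
        intro k
        rw [PySem.Int.mod_natCast]
        by_cases h : k % N = iN
        · simp [h]
        · have h2a : ¬ ((k % N : Nat) : Int) = ((iN : Nat) : Int) := by exact_mod_cast h
          have h2b : ¬ ((k : Int) % (N : Int)) = ((iN : Nat) : Int) := by
            rw [← Int.natCast_mod]; exact h2a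
          simp [h, h2a, h2b]
      have hfc : List.filter (fun x : Nat => PySem.Int.mod ((x : Nat) : Int) ((N : Nat) : Int) == ((iN : Nat) : Int)) (List.range L)
          = List.filter (fun k => k % N == iN) (List.range L) :=
        List.filter_congr (fun k _ => hpred k)
      rw [hfc]
      rw [hLd]
      rw [pvFilt N iN hiNlt q r (le_of_lt hrlt)]
      rw [← hK]
      rw [List.map_map]
      apply List.map_congr_left
      intro j _
      simp only [Function.comp_def, PySem.List.pyGetD_natCast]
    rw [hbucket]
    have hlenK : ((List.range K).map (fun j => vec.getD (j * N + iN) 0)).length = K := by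
      simp
    rw [hlenK]
    rw [show (((Cnat : Nat) : Int) - ((K : Nat) : Int)).toNat = Cnat - K by omega]
    -- split the target row at K
    rw [show Cnat = K + (Cnat - K) by omega, List.range_add, List.map_append]
    congr 1
    · apply List.map_congr_left
      intro j hj
      rw [hveq, pvGetD_pad, if_pos (by rw [← hL]; exact hidx_lt j (List.mem_range.mp hj))]
    · rw [List.map_map]
      have : ∀ j ∈ List.range (Cnat - K),
          v.getD ((K + j) * N + iN) 0 = (0 : Int) := by
        intro j _
        rw [hveq, pvGetD_pad, if_neg (by rw [← hL]; push_neg; exact hidx_ge _ (by omega))]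
      rw [List.map_congr_left (by intro j hj; exact this j hj)]
      simp [List.map_const']

-- ===== VERDICT (by name: the statement is the Claim_ definition above) =====
theorem vector_a_matriz_spec : Claim_equal_vector_a_matriz := by
  intro vec n _ hn
  unfold Spec_vector_a_matriz
  exact pv_main vec n hn
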